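-- pv_equiv track=rewrite | github.com/DhanushVinjamoor/ResidentialStatusCalc | Sec6_residentialstatus.py | days_in_year
-- ===== SOURCE A (Python) =====
-- def days_in_year(year):
--
--     # get number of days in a given FY. year argument provided must be the year in which the ending March falles on
--     # for example for FY 22-23 the argument must be 2023
--
--     year = int(year)
--     from calendar import monthrange
--     finalcount = []
--     for month in range(4, 16):
--         if month <= 12:
--             finalcount.append(monthrange(year - 1, month)[1])
--         else:
--             finalcount.append(monthrange(year, month - 12)[1])
--
--     return sum(finalcount)
-- ===== SOURCE B (Python) =====
-- def days_in_year(year):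
--     # Closed form: in the April(year-1)..March(year) window only February of
--     # `year` varies, so the total is 365 plus one leap day iff `year` is leap.
--     year = int(year)
--     from calendar import isleap
--     return 365 + isleap(year)
-- ===== Notes on version B (the rewrite author's own statement) =====
-- stated objective: simpler
-- what changed: Replaces the month-by-month monthrange loop and list accumulator with the closed form common-year total plus isleap(year), since only February of the ending year varies in the fiscal window.
import Mathlib
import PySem

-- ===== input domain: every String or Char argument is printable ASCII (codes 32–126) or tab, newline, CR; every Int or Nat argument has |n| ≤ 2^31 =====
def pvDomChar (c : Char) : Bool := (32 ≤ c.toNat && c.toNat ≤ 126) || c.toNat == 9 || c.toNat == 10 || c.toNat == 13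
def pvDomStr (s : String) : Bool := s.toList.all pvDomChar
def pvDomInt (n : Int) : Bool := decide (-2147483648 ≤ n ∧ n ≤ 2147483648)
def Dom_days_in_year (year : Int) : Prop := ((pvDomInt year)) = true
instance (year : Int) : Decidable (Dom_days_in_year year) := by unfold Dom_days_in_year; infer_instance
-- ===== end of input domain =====

-- B: closed form (common-year total plus isleap) instead of summing monthrange lengths over the fiscal months (simpler).

-- ===== PORT A =====
-- calendar.isleap (shared library helper of calendar.monthrange and calendar.isleap)
def pyIsleap (y : Int) : Bool :=
  PySem.Int.mod y 4 == 0 && (PySem.Int.mod y 100 != 0 || PySem.Int.mod y 400 == 0)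

-- calendar.mdays table; monthrange(y, m)[1] = mdays[m] + (m == 2 and isleap(y))
def pyMdays : List Int := [0, 31, 28, 31, 30, 31, 30, 31, 31, 30, 31, 30, 31]

def monthrangeDays (y m : Int) : Int :=
  (PySem.List.pyGet? pyMdays m).getD 0 + (if m == 2 && pyIsleap y then 1 else 0)

def days_in_year (year : Int) : Int :=
  let finalcount : List Int :=
    (PySem.List.pyRange 4 16 1).foldl (fun acc month =>
      if month ≤ 12 then acc ++ [monthrangeDays (year - 1) month]
      else acc ++ [monthrangeDays year (month - 12)]) []
  finalcount.sum

-- ===== PORT B =====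
def days_in_year_alt (year : Int) : Int :=
  365 + (if pyIsleap year then 1 else 0)

-- ===== PRECONDITION & SPEC =====
def Spec_days_in_year (year : Int) (out : Int) : Prop := out = days_in_year_alt year
instance (year : Int) (out : Int) : Decidable (Spec_days_in_year year out) := by unfold Spec_days_in_year; infer_instance

-- ===== CLAIM (what is proved, stated in full; the proofs are below) =====
def Claim_equal_days_in_year : Prop := ∀ (year : Int), Dom_days_in_year year → Spec_days_in_year year (days_in_year year)

-- ===== LEMMAS AND PROOFS =====
theorem pyRange_4_16 : PySem.List.pyRange 4 16 1 = [4,5,6,7,8,9,10,11,12,13,14,15] := by decide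

-- ===== VERDICT (by name: the statement is the Claim_ definition above) =====
theorem days_in_year_spec : Claim_equal_days_in_year := by
  intro year _
  unfold Spec_days_in_year days_in_year days_in_year_alt
  rw [pyRange_4_16]
  cases h : pyIsleap year <;>
    simp [monthrangeDays, pyMdays, h, PySem.List.pyGet?, PySem.List.pyIdx?]
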